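-- pv_equiv track=rewrite | github.com/egeatmaca/BugunNeYapsam | helpfunctions.py | encodeToString
-- ===== SOURCE A (Python) =====
-- CATS = [
-- 		"Sinema", 					# 0
-- 		"Spor ve Saglikli Yasam",	# 1
-- 		"Oyunlar",					# 2
-- 		"Kitap",					# 3
-- 		"Kisisel Gelisim",			# 4
-- 		"Egitim",					# 5
-- 		"Mutfak",					# 6
-- 		"Diger"						# 7
-- 	]
--
-- def encodeToString(categories:list) ->str:
-- 	enc = ['0','0','0','0','0','0','0','0']
-- 	for idx, cat in enumerate(CATS):
-- 		if cat in categories: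
-- 			enc[idx] = '1'
-- 	if "Spor" in categories:
-- 		enc[1] = '1'
-- 	if "Kisisel" in categories:
-- 		enc[4] = '1'
--
-- 	return "".join(enc)
-- ===== SOURCE B (Python) =====
-- BITS = {
--     "Sinema": 0,
--     "Spor ve Saglikli Yasam": 1,
--     "Spor": 1,
--     "Oyunlar": 2,
--     "Kitap": 3,
--     "Kisisel Gelisim": 4,
--     "Kisisel": 4,
--     "Egitim": 5,
--     "Mutfak": 6,
--     "Diger": 7,
-- }
--
-- def encodeToString(categories: list) -> str:
--     enc = ['0'] * 8
--     for cat in categories: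
--         i = BITS.get(cat)
--         if i is not None:
--             enc[i] = '1'
--     return "".join(enc)
-- ===== Notes on version B (the rewrite author's own statement) =====
-- stated objective: idiomatic
-- what changed: B replaces A's eight scans of the fixed CATS list (one 'cat in categories' membership test per category, plus two alias checks) with a single pass over the input list, using a precomputed name-to-bit-index dict that includes the two aliases.
import Mathlib
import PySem

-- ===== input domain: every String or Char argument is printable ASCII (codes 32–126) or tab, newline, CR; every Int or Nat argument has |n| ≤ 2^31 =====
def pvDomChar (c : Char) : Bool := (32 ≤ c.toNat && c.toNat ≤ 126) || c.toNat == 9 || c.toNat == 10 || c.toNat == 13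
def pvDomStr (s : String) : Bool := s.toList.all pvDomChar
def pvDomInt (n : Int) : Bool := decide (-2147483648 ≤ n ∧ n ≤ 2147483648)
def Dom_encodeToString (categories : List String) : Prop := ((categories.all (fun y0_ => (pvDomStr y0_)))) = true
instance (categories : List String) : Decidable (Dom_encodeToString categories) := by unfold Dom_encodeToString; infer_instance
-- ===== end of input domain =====

-- B replaces A's eight scans of the fixed CATS list (plus two alias checks) with one pass
-- over the input list using a precomputed name→bit-index dict (idiomatic; same cost class).

-- ===== PORT A =====
def CATS : List String :=
  ["Sinema", "Spor ve Saglikli Yasam", "Oyunlar", "Kitap",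
   "Kisisel Gelisim", "Egitim", "Mutfak", "Diger"]

def encodeToString (categories : List String) : String :=
  let enc : List Char := ['0','0','0','0','0','0','0','0']
  let enc := (PySem.List.enumerate CATS).foldl
    (fun e p => if categories.contains p.2 then e.set p.1.toNat '1' else e) enc
  let enc := if categories.contains "Spor" then enc.set 1 '1' else enc
  let enc := if categories.contains "Kisisel" then enc.set 4 '1' else enc
  String.ofList enc

-- ===== PORT B =====
def BITS : PySem.Dict String Int :=
  PySem.Dict.mk
    [("Sinema", 0), ("Spor ve Saglikli Yasam", 1), ("Spor", 1), ("Oyunlar", 2),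
     ("Kitap", 3), ("Kisisel Gelisim", 4), ("Kisisel", 4), ("Egitim", 5),
     ("Mutfak", 6), ("Diger", 7)]

def encodeToString_alt (categories : List String) : String :=
  String.ofList <| categories.foldl
    (fun e cat =>
      match BITS.get? cat with
      | some i => e.set i.toNat '1'
      | none => e)
    (List.replicate 8 '0')

-- ===== PRECONDITION & SPEC =====
def Spec_encodeToString (categories : List String) (out : String) : Prop := out = encodeToString_alt categories
instance (categories : List String) (out : String) : Decidable (Spec_encodeToString categories out) := by unfold Spec_encodeToString; infer_instance

-- ===== CLAIM (what is proved, stated in full; the proofs are below) =====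
def Claim_equal_encodeToString : Prop := ∀ (categories : List String), Dom_encodeToString categories → Spec_encodeToString categories (encodeToString categories)

-- ===== LEMMAS AND PROOFS =====

-- common shape of both loops: each element optionally sets one position to '1'
def setStep {α : Type} (f : α → Option Nat) (e : List Char) (x : α) : List Char :=
  match f x with
  | some i => e.set i '1'
  | none => e

theorem setStep_length {α : Type} (f : α → Option Nat) (e : List Char) (x : α) :
    (setStep f e x).length = e.length := by
  unfold setStep; cases f x <;> simp

theorem foldl_setStep_length {α : Type} (f : α → Option Nat) (l : List α) (e : List Char) :
    (l.foldl (setStep f) e).length = e.length := by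
  induction l generalizing e with
  | nil => rfl
  | cons x xs ih => simp [List.foldl_cons, ih, setStep_length]

theorem setStep_getD {α : Type} (f : α → Option Nat) (e : List Char) (x : α) (j : Nat)
    (hj : j < e.length) (d : Char) :
    (setStep f e x).getD j d = if f x == some j then '1' else e.getD j d := by
  unfold setStep
  cases hfx : f x with
  | none => simp
  | some i =>
    have hj' : j < (e.set i '1').length := by simpa using hj
    rw [List.getD_eq_getElem _ d hj', List.getD_eq_getElem _ d hj, List.getElem_set]
    by_cases hij : i = j <;> simp [hij]

theorem foldl_setStep_getD {α : Type} (f : α → Option Nat) (l : List α) (e : List Char)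
    (j : Nat) (hj : j < e.length) (d : Char) :
    (l.foldl (setStep f) e).getD j d =
      if l.any (fun x => f x == some j) then '1' else e.getD j d := by
  induction l generalizing e with
  | nil => simp
  | cons x xs ih =>
    have hb : j < (setStep f e x).length := by rw [setStep_length]; exact hj
    rw [List.foldl_cons, ih (setStep f e x) hb, setStep_getD f e x j hj d]
    by_cases h1 : xs.any (fun x => f x == some j) <;>
      by_cases h2 : f x == some j <;> simp [h1, h2]

-- the optional-index functions the two loops instantiate setStep with
def fA (cats : List String) (p : Int × String) : Option Nat :=
  if cats.contains p.2 then some p.1.toNat else none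

def fB (cat : String) : Option Nat := (BITS.get? cat).map Int.toNat

theorem aFold_eq (cats : List String) (e : List Char) (l : List (Int × String)) :
    l.foldl (fun e p => if cats.contains p.2 then e.set p.1.toNat '1' else e) e =
      l.foldl (setStep (fA cats)) e := by
  have hfun : (fun e p => if cats.contains p.2 then e.set p.1.toNat '1' else e) =
      setStep (fA cats) := by
    funext e p
    unfold setStep fA
    by_cases h : p.2 ∈ cats <;> simp [h]
  rw [hfun]

theorem bFold_eq (cats : List String) (e : List Char) :
    cats.foldl (fun e cat =>
        match BITS.get? cat with
        | some i => e.set i.toNat '1'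
        | none => e) e =
      cats.foldl (setStep fB) e := by
  have hfun : (fun (e : List Char) cat =>
      match BITS.get? cat with
      | some i => e.set i.toNat '1'
      | none => e) = setStep fB := by
    funext e cat
    unfold setStep fB
    cases BITS.get? cat <;> simp
  rw [hfun]

-- getD through A's two alias updates
theorem ite_set_getD (b : Bool) (i : Nat) (e : List Char) (j : Nat)
    (hj : j < e.length) (d : Char) :
    (if b then e.set i '1' else e).getD j d = if b ∧ i = j then '1' else e.getD j d := by
  cases b with
  | false => simp
  | true =>
    have hj' : j < (e.set i '1').length := by simpa using hj
    simp only [if_pos, List.getD_eq_getElem _ d hj', List.getD_eq_getElem _ d hj,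
      List.getElem_set]
    by_cases hij : i = j <;> simp [hij]

-- B's bit condition for a single element, by scanning the literal dict
theorem fB_eq_some (c : String) (j : Nat) :
    (fB c == some j) =
      ((c == "Sinema" && 0 == j) || (c == "Spor ve Saglikli Yasam" && 1 == j) ||
       (c == "Spor" && 1 == j) || (c == "Oyunlar" && 2 == j) ||
       (c == "Kitap" && 3 == j) || (c == "Kisisel Gelisim" && 4 == j) ||
       (c == "Kisisel" && 4 == j) || (c == "Egitim" && 5 == j) ||
       (c == "Mutfak" && 6 == j) || (c == "Diger" && 7 == j)) := by
  apply Bool.eq_iff_iff.mpr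
  unfold fB BITS
  simp only [PySem.Dict.get?_mk_cons]
  split_ifs with h1 h2 h3 h4 h5 h6 h7 h8 h9 h10 <;>
    simp_all [beq_iff_eq] <;> (try subst_eqs) <;> (try simp_all)
  refine ⟨fun ⟨a, ha, _⟩ => ?_, fun h => ?_⟩
  · simp [PySem.Dict.get?] at ha
  · rcases h with ((((((((⟨hc,_⟩|⟨hc,_⟩)|⟨hc,_⟩)|⟨hc,_⟩)|⟨hc,_⟩)|⟨hc,_⟩)|⟨hc,_⟩)|⟨hc,_⟩)|⟨hc,_⟩)|⟨hc,_⟩ <;> simp_all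

theorem any_and_const (l : List String) (s : String) (b : Bool) :
    l.any (fun c => c == s && b) = (l.contains s && b) := by
  induction l with
  | nil => simp
  | cons x xs ih =>
    by_cases h : x = s
    · subst h; simp [List.any_cons, ih]
    · have h1 : (x == s) = false := by simp [h]
      have h2 : decide (s = x) = false := by
        rw [decide_eq_false_iff_not]; exact fun hh => h hh.symm
      simp [List.any_cons, ih, h1, h2]

theorem my_any_or {α : Type} (l : List α) (f g : α → Bool) :
    l.any (fun x => f x || g x) = (l.any f || l.any g) := by
  induction l with
  | nil => rfl
  | cons x xs ih =>
    simp only [List.any_cons, ih]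
    cases f x <;> cases g x <;> cases xs.any f <;> cases xs.any g <;> rfl

theorem any_fB (cats : List String) (j : Nat) :
    cats.any (fun c => fB c == some j) =
      ((cats.contains "Sinema" && 0 == j) || (cats.contains "Spor ve Saglikli Yasam" && 1 == j) ||
       (cats.contains "Spor" && 1 == j) || (cats.contains "Oyunlar" && 2 == j) ||
       (cats.contains "Kitap" && 3 == j) || (cats.contains "Kisisel Gelisim" && 4 == j) ||
       (cats.contains "Kisisel" && 4 == j) || (cats.contains "Egitim" && 5 == j) ||
       (cats.contains "Mutfak" && 6 == j) || (cats.contains "Diger" && 7 == j)) := by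
  simp only [fB_eq_some, my_any_or, any_and_const]

theorem ite_some_none_beq (b : Prop) [Decidable b] (i j : Nat) :
    ((if b then some i else none) == some j) = (decide b && (i == j)) := by
  by_cases h : b <;> simp [h]

theorem any_fA (cats : List String) (j : Nat) :
    (PySem.List.enumerate CATS).any (fun p => fA cats p == some j) =
      ((cats.contains "Sinema" && 0 == j) || (cats.contains "Spor ve Saglikli Yasam" && 1 == j) ||
       (cats.contains "Oyunlar" && 2 == j) || (cats.contains "Kitap" && 3 == j) ||
       (cats.contains "Kisisel Gelisim" && 4 == j) || (cats.contains "Egitim" && 5 == j) ||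
       (cats.contains "Mutfak" && 6 == j) || (cats.contains "Diger" && 7 == j)) := by
  unfold CATS
  simp only [PySem.List.enumerate_cons, PySem.List.enumerate_nil, List.any_cons, List.any_nil,
    fA, ite_some_none_beq]
  norm_num [show ((2 : Int)).toNat = 2 from rfl, show ((3 : Int)).toNat = 3 from rfl,
    show ((4 : Int)).toNat = 4 from rfl, show ((5 : Int)).toNat = 5 from rfl,
    show ((6 : Int)).toNat = 6 from rfl, show ((7 : Int)).toNat = 7 from rfl]
  simp only [Bool.or_assoc]

-- ===== VERDICT (by name: the statement is the Claim_ definition above) =====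
theorem encodeToString_spec : Claim_equal_encodeToString := by
  intro cats _
  show encodeToString cats = encodeToString_alt cats
  simp only [encodeToString, encodeToString_alt]
  rw [aFold_eq, bFold_eq]
  apply congrArg String.ofList
  have hlenF : ((PySem.List.enumerate CATS).foldl (setStep (fA cats))
      ['0','0','0','0','0','0','0','0']).length = 8 := by
    rw [foldl_setStep_length]; rfl
  have hlen1 : ((if cats.contains "Spor" then
      ((PySem.List.enumerate CATS).foldl (setStep (fA cats))
        ['0','0','0','0','0','0','0','0']).set 1 '1'
      else (PySem.List.enumerate CATS).foldl (setStep (fA cats))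
        ['0','0','0','0','0','0','0','0'])).length = 8 := by
    split_ifs <;> simp [hlenF]
  have hlenB : (cats.foldl (setStep fB) (List.replicate 8 '0')).length = 8 := by
    rw [foldl_setStep_length]; simp
  apply List.ext_getElem
  · rw [hlenB]; split_ifs <;> simp [hlenF]
  · intro j hjA hjB
    have hj8 : j < 8 := by rwa [hlenB] at hjB
    rw [← List.getD_eq_getElem _ '?' hjA, ← List.getD_eq_getElem _ '?' hjB]
    rw [ite_set_getD _ _ _ _ (by rw [hlen1]; exact hj8),
        ite_set_getD _ _ _ _ (by rw [hlenF]; exact hj8),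
        foldl_setStep_getD _ _ _ _ (by simpa using hj8),
        foldl_setStep_getD _ _ _ _ (by simp [hj8]),
        any_fA, any_fB]
    have hge0 : (['0','0','0','0','0','0','0','0'] : List Char).getD j '?' = '0' := by
      interval_cases j <;> rfl
    have hgr : (List.replicate 8 '0').getD j '?' = '0' := by
      interval_cases j <;> rfl
    rw [hge0, hgr]
    interval_cases j <;>
      by_cases hS : "Spor" ∈ cats <;> by_cases hK : "Kisisel" ∈ cats <;>
      by_cases h1 : "Spor ve Saglikli Yasam" ∈ cats <;>
      by_cases h4 : "Kisisel Gelisim" ∈ cats <;>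
      simp [hS, hK, h1, h4]
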